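-- pv_equiv track=rewrite | github.com/matthewdgreen/decipher | src/analysis/pattern.py | find_isomorphs
-- ===== SOURCE A (Python) =====
-- from collections import defaultdict
--
-- def word_pattern(tokens: list[int]) -> str:
--     """Compute the isomorph pattern of a token sequence.
--
--     Maps each unique token to a sequential integer, producing a
--     canonical pattern string like "0.1.2.1.0".
--     """
--     mapping: dict[int, int] = {}
--     pattern_parts: list[str] = []
--     next_id = 0
--     for t in tokens:
--         if t not in mapping:
--             mapping[t] = next_id
--             next_id += 1
--         pattern_parts.append(str(mapping[t]))
--     return ".".join(pattern_parts)
--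
-- def find_isomorphs(
--     token_words: list[list[int]],
-- ) -> dict[str, list[list[int]]]:
--     """Group words by their isomorph pattern."""
--     groups: dict[str, list[list[int]]] = defaultdict(list)
--     for word in token_words:
--         pat = word_pattern(word)
--         groups[pat].append(word)
--     return dict(groups)
-- ===== SOURCE B (Python) =====
-- def word_pattern(tokens):
--     """Isomorph pattern via first-occurrence ranks: the label of a token is its
--     index in the ordered list of distinct tokens."""
--     firsts = list(dict.fromkeys(tokens))
--     return ".".join(str(firsts.index(t)) for t in tokens)
--
-- def find_isomorphs(token_words):
--     """Group words by isomorph pattern: compute all patterns up front, then build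
--     the result by one comprehension per distinct pattern (first-appearance order)."""
--     pats = [word_pattern(w) for w in token_words]
--     order = list(dict.fromkeys(pats))
--     return {p: [w for q, w in zip(pats, token_words) if q == p] for p in order}
-- ===== Notes on version B (the rewrite author's own statement) =====
-- stated objective: alternative
-- what changed: Pattern labels come from each token's rank in the ordered list of first occurrences (list.index into dict.fromkeys) instead of a running next_id dict, and grouping is done by computing all patterns first and emitting one filtered comprehension per distinct pattern instead of a single defaultdict accumulation pass.
import Mathlib
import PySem

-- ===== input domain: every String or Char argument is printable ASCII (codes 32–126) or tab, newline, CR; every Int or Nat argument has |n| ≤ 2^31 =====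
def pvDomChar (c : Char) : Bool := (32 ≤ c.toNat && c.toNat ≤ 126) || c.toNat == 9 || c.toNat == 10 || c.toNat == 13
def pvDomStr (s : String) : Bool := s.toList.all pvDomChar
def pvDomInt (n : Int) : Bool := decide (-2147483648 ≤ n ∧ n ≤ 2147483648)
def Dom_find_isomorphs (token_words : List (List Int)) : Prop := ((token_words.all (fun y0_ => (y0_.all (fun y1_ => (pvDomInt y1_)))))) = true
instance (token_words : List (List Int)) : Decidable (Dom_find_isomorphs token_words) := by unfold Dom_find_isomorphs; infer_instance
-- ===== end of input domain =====

-- B replaces A's single-pass defaultdict accumulation by: label each token by its rank among first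
-- occurrences (instead of a running next_id counter), then build the grouping by one filter pass per
-- distinct pattern (alternative decomposition, same results).

-- ===== PORT A =====
def word_pattern (tokens : List Int) : String :=
  -- mapping : Dict Int Int, pattern_parts : List String, next_id : Int
  let st := tokens.foldl
    (fun (st : PySem.Dict Int Int × List String × Int) t =>
      let m := st.1
      let parts := st.2.1
      let nid := st.2.2
      -- if t not in mapping: mapping[t] = next_id; next_id += 1
      let m' := if m.contains t then m else m.insert t nid
      let nid' := if m.contains t then nid else nid + 1
      -- pattern_parts.append(str(mapping[t]))
      (m', parts ++ [PySem.Int.toStr (m'.getD t 0)], nid'))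
    (PySem.Dict.empty, [], 0)
  PySem.Str.join "." st.2.1

def find_isomorphs (token_words : List (List Int)) : List (String × List (List Int)) :=
  -- groups[pat].append(word); return dict(groups)
  (token_words.foldl
    (fun (g : PySem.Dict String (List (List Int))) w =>
      g.modify (word_pattern w) [] (· ++ [w]))
    PySem.Dict.empty).items

-- ===== PORT B =====
def word_pattern_alt (tokens : List Int) : String :=
  let firsts := PySem.List.dedup tokens
  PySem.Str.join "." (tokens.map (fun t =>
    PySem.Int.toStr (((PySem.List.index? firsts t).getD 0 : Nat) : Int)))

def find_isomorphs_alt (token_words : List (List Int)) : List (String × List (List Int)) :=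
  let pats := token_words.map word_pattern_alt
  let order := PySem.List.dedup pats
  order.map (fun p => (p, ((pats.zip token_words).filter (fun q => q.1 == p)).map (·.2)))

-- ===== PRECONDITION & SPEC =====
def Spec_find_isomorphs (token_words : List (List Int)) (out : List (String × List (List Int))) : Prop := out = find_isomorphs_alt token_words
instance (token_words : List (List Int)) (out : List (String × List (List Int))) : Decidable (Spec_find_isomorphs token_words out) := by unfold Spec_find_isomorphs; infer_instance

-- ===== CLAIM (what is proved, stated in full; the proofs are below) =====
def Claim_equal_find_isomorphs : Prop := ∀ (token_words : List (List Int)), Dom_find_isomorphs token_words → Spec_find_isomorphs token_words (find_isomorphs token_words)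

-- ===== LEMMAS AND PROOFS =====

-- the body of A's word_pattern loop, named for the proofs
def wpStep (st : PySem.Dict Int Int × List String × Int) (t : Int) :
    PySem.Dict Int Int × List String × Int :=
  let m := st.1
  let parts := st.2.1
  let nid := st.2.2
  let m' := if m.contains t then m else m.insert t nid
  let nid' := if m.contains t then nid else nid + 1
  (m', parts ++ [PySem.Int.toStr (m'.getD t 0)], nid')

-- Set.update only appends fresh elements at the end
lemma update_exists_ext (xs s : List Int) : ∃ ext, PySem.Set.update s xs = s ++ ext := by
  induction xs generalizing s with
  | nil => exact ⟨[], by simp [PySem.Set.update]⟩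
  | cons x xs ih =>
    rcases ih (PySem.Set.add s x) with ⟨e, he⟩
    by_cases hx : x ∈ s
    · refine ⟨e, ?_⟩
      rw [show PySem.Set.update s (x :: xs) = PySem.Set.update (PySem.Set.add s x) xs from rfl,
        show PySem.Set.add s x = s from by simp [PySem.Set.add, hx]] at *
      exact he
    · refine ⟨x :: e, ?_⟩
      rw [show PySem.Set.update s (x :: xs) = PySem.Set.update (PySem.Set.add s x) xs from rfl,
        show PySem.Set.add s x = s ++ [x] from by simp [PySem.Set.add, hx]] at *
      rw [he]; simp

lemma index?_update_of_mem {t : Int} {s : List Int} (xs : List Int) (h : t ∈ s) :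
    PySem.List.index? (PySem.Set.update s xs) t = PySem.List.index? s t := by
  rcases update_exists_ext xs s with ⟨e, he⟩
  rw [he, PySem.List.index?_append_of_mem e h]

-- invariant for A's word_pattern loop
lemma wp_fold (tokens : List Int) :
    ∀ (seen : List Int) (m : PySem.Dict Int Int) (parts : List String),
    seen.Nodup →
    (∀ u, m.get? u = (PySem.List.index? seen u).map (fun (k : Nat) => (k : Int))) →
    (tokens.foldl wpStep (m, parts, (seen.length : Int))).2.1
    = parts ++ tokens.map (fun t =>
        PySem.Int.toStr (((PySem.List.index? (PySem.Set.update seen tokens) t).getD 0 : Nat) : Int)) := by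
  induction tokens with
  | nil => intro seen m parts _ _; simp [PySem.Set.update]
  | cons t ts ih =>
    intro seen m parts hnd hm
    have hcont : m.contains t = (decide (t ∈ seen)) := by
      rw [PySem.Dict.contains_eq_isSome_get?, hm t]
      by_cases h : t ∈ seen
      · simp [h]
      · simp [h]
    have hupd : PySem.Set.update seen (t :: ts) = PySem.Set.update (PySem.Set.add seen t) ts := by
      simp [PySem.Set.update]
    rw [List.foldl_cons, List.map_cons]
    by_cases hts : t ∈ seen
    · -- t already seen: dict unchanged
      have hadd : PySem.Set.add seen t = seen := by
        simp [PySem.Set.add, hts]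
      obtain ⟨k, hk⟩ : ∃ k, PySem.List.index? seen t = some k :=
        Option.isSome_iff_exists.mp ((PySem.List.index?_isSome_iff seen t).mpr hts)
      have hgd : m.getD t 0 = (k : Int) := by
        rw [PySem.Dict.getD_eq_get?_getD, hm t, hk]; rfl
      have hidx : PySem.List.index? (PySem.Set.update seen (t :: ts)) t = some k := by
        rw [hupd, hadd, index?_update_of_mem ts hts, hk]
      have hstep : wpStep (m, parts, (seen.length : Int)) t
          = (m, parts ++ [PySem.Int.toStr (k : Int)], (seen.length : Int)) := by
        simp [wpStep, hcont, hts, hgd]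
      rw [hstep, ih seen m _ hnd hm, hidx, hupd, hadd]
      simp
    · -- fresh t: insert with next_id = seen.length
      have hadd : PySem.Set.add seen t = seen ++ [t] := by
        simp [PySem.Set.add, hts]
      have hnd' : (seen ++ [t]).Nodup := by
        refine List.Nodup.append hnd (List.nodup_singleton t) ?_
        intro a ha hb
        simp only [List.mem_singleton] at hb
        subst hb
        exact hts ha
      have hm' : ∀ u, (m.insert t (seen.length : Int)).get? u
          = (PySem.List.index? (seen ++ [t]) u).map (fun (k : Nat) => (k : Int)) := by
        intro u
        by_cases hu : u = t
        · subst hu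
          rw [PySem.Dict.get?_insert_self, PySem.List.index?_append_singleton_self seen u hts]
          rfl
        · rw [PySem.Dict.get?_insert_of_ne m _ hu, hm u]
          by_cases hus : u ∈ seen
          · rw [PySem.List.index?_append_of_mem [t] hus]
          · have hu2 : u ∉ seen ++ [t] := by simp [hus, hu]
            rw [(PySem.List.index?_eq_none_iff seen u).mpr hus,
              (PySem.List.index?_eq_none_iff _ u).mpr hu2]
      have hgd : (m.insert t (seen.length : Int)).getD t 0 = (seen.length : Int) := by
        rw [PySem.Dict.getD_eq_get?_getD, PySem.Dict.get?_insert_self]; rfl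
      have hidx : PySem.List.index? (PySem.Set.update seen (t :: ts)) t = some seen.length := by
        rw [hupd, hadd, index?_update_of_mem ts (by simp), PySem.List.index?_append_singleton_self seen t hts]
      have hstep : wpStep (m, parts, (seen.length : Int)) t
          = (m.insert t (seen.length : Int),
             parts ++ [PySem.Int.toStr ((seen.length : Nat) : Int)],
             ((seen ++ [t]).length : Int)) := by
        simp [wpStep, hcont, hts, hgd]
      rw [hstep, ih (seen ++ [t]) _ _ hnd' hm', hidx, hupd, hadd]
      simp

-- the two pattern functions agree
lemma wp_eq (tokens : List Int) : word_pattern tokens = word_pattern_alt tokens := by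
  have h0 : ∀ u, (PySem.Dict.empty : PySem.Dict Int Int).get? u
      = (PySem.List.index? ([] : List Int) u).map (fun (k : Nat) => (k : Int)) := by
    intro u; simp [PySem.Dict.get?_empty, PySem.List.index?_eq_idxOf?]
  have h := wp_fold tokens [] PySem.Dict.empty [] (by simp) h0
  have hupd : PySem.Set.update ([] : List Int) tokens = PySem.List.dedup tokens := by
    rw [PySem.List.dedup_eq_ofList, PySem.Set.ofList_eq_foldl]; rfl
  rw [hupd] at h
  calc word_pattern tokens
      = PySem.Str.join "." ((tokens.foldl wpStep
          (PySem.Dict.empty, [], ((([] : List Int).length : Nat) : Int))).2.1) := rfl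
    _ = PySem.Str.join "." ([] ++ tokens.map (fun t =>
          PySem.Int.toStr (((PySem.List.index? (PySem.List.dedup tokens) t).getD 0 : Nat) : Int))) := by
        rw [h]
    _ = word_pattern_alt tokens := by simp [word_pattern_alt]

-- ===== VERDICT (by name: the statement is the Claim_ definition above) =====
theorem find_isomorphs_spec : Claim_equal_find_isomorphs := by
  intro token_words _
  unfold Spec_find_isomorphs find_isomorphs find_isomorphs_alt
  have hpats : token_words.map word_pattern_alt = token_words.map word_pattern :=
    List.map_congr_left (fun w _ => (wp_eq w).symm)
  -- rewrite A's fold as a fold over (pattern, word) pairs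
  have hfold : token_words.foldl
      (fun (g : PySem.Dict String (List (List Int))) w => g.modify (word_pattern w) [] (· ++ [w]))
      PySem.Dict.empty
    = (token_words.map (fun w => (word_pattern w, w))).foldl
      (fun (g : PySem.Dict String (List (List Int))) p => g.modify p.1 [] (· ++ [p.2]))
      PySem.Dict.empty := by
    rw [List.foldl_map]
  set L := token_words.map (fun w => (word_pattern w, w)) with hL
  have hzip : (token_words.map word_pattern_alt).zip token_words = L := by
    rw [hpats, hL]
    simpa using (List.zip_map' (f := word_pattern) (g := id) (l := token_words))
  set d := L.foldl (fun (g : PySem.Dict String (List (List Int))) p => g.modify p.1 [] (· ++ [p.2]))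
      PySem.Dict.empty with hd
  have hnodup : d.keys.Nodup := by
    rw [hd]
    exact PySem.Dict.nodup_keys_foldl_modify_key L Prod.fst [] (fun _ p => (· ++ [p.2])) _
      (by simp [PySem.Dict.keys_empty])
  have hkeys : d.keys = PySem.List.dedup (token_words.map word_pattern_alt) := by
    rw [hd, PySem.Dict.keys_foldl_modify_key, PySem.Dict.keys_empty, hpats,
      PySem.List.dedup_eq_ofList, PySem.Set.ofList_eq_foldl, hL, List.map_map]
    rfl
  have hget : ∀ c, d.getD c [] = ((L.filter (fun q => q.1 == c)).map (·.2)) := by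
    intro c
    rw [hd, PySem.Dict.getD_foldl_modify_append, PySem.Dict.getD_empty]
    simp
  rw [hfold]
  show d.items = (PySem.List.dedup (token_words.map word_pattern_alt)).map
    (fun p => (p, (((token_words.map word_pattern_alt).zip token_words).filter
      (fun q => q.1 == p)).map (·.2)))
  rw [hzip, PySem.Dict.items_eq_map_keys d hnodup [], hkeys]
  exact List.map_congr_left (fun p _ => by rw [hget p])
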